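-- pv_equiv track=rewrite | github.com/tzutzzzzz/stanCode_SC101_Projects | SC101_Projects/SC101_Assignment5/largest_digit.py | digits_sorted
-- ===== SOURCE A (Python) =====
-- def digits_sorted(num: int) -> bool:
-- 	# Your Code Here
-- 	if num < 0:
-- 		num *= -1
-- 	if num < 10:
-- 		return True
-- 	else:
-- 		if num % 10 < (num // 10) % 10:
-- 			return False
-- 		return digits_sorted(num // 10)
-- ===== SOURCE B (Python) =====
-- def digits_sorted(num: int) -> bool:
--     s = str(abs(num))
--     return list(s) == sorted(s)
-- ===== Notes on version B (the rewrite author's own statement) =====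
-- stated objective: idiomatic
-- what changed: Replaces the recursive modular-arithmetic digit comparison with a sort-and-compare on the decimal string: str(abs(num)) equals its sorted form iff the digits are non-decreasing.
import Mathlib
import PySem

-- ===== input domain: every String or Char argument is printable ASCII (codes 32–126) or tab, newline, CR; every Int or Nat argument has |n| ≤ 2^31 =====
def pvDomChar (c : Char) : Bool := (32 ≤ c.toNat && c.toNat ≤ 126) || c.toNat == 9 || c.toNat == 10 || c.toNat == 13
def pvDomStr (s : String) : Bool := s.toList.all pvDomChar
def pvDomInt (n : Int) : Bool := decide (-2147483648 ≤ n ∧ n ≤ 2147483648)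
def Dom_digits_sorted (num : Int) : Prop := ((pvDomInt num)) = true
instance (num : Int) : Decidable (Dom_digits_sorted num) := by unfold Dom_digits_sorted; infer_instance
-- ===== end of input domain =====

-- B replaces A's recursive modular-arithmetic digit check by the idiomatic sort-and-compare on str(abs(num)).


-- ===== PORT A =====
def digits_sorted (num : Int) : Bool :=
  if num < 0 then
    -- Python reassigns num *= -1; ported as a tail call on the non-negative value
    digits_sorted (num * -1)
  else if num < 10 then
    true
  else
    if PySem.Int.mod num 10 < PySem.Int.mod (PySem.Int.floordiv num 10) 10 then
      false
    else
      digits_sorted (PySem.Int.floordiv num 10)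
termination_by 2 * num.natAbs + (if num < 0 then 1 else 0)
decreasing_by
  · rw [if_pos ‹num < 0›]
    split <;> omega
  · simp only [PySem.Int.floordiv, Int.fdiv_eq_ediv]
    rw [if_pos (Or.inl (by norm_num : (0:Int) ≤ 10))]
    split <;> omega

-- ===== PORT B =====
def digits_sorted_alt (num : Int) : Bool :=
  let s := PySem.Int.toStr |num|
  s.toList == PySem.List.sorted s.toList (fun c => c) false

-- ===== PRECONDITION & SPEC =====
def Spec_digits_sorted (num : Int) (out : Bool) : Prop := out = digits_sorted_alt num
instance (num : Int) (out : Bool) : Decidable (Spec_digits_sorted num out) := by unfold Spec_digits_sorted; infer_instance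

-- ===== CLAIM (what is proved, stated in full; the proofs are below) =====
def Claim_equal_digits_sorted : Prop := ∀ (num : Int), Dom_digits_sorted num → Spec_digits_sorted num (digits_sorted num)

-- ===== LEMMAS AND PROOFS =====

/-- Big-endian decimal digit characters of `n` (proof helper). -/
def goChars (n : Nat) : List Char :=
  if n < 10 then [Nat.digitChar n]
  else goChars (n / 10) ++ [Nat.digitChar (n % 10)]
termination_by n
decreasing_by exact Nat.div_lt_self (by omega) (by omega)

theorem goChars_lt {n : Nat} (h : n < 10) : goChars n = [Nat.digitChar n] := by
  conv_lhs => rw [goChars]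
  rw [if_pos h]

theorem goChars_ge {n : Nat} (h : ¬ n < 10) :
    goChars n = goChars (n / 10) ++ [Nat.digitChar (n % 10)] := by
  conv_lhs => rw [goChars]
  rw [if_neg h]

theorem toDigitsCore_eq : ∀ (f n : Nat) (ds : List Char), n < f →
    Nat.toDigitsCore 10 f n ds = goChars n ++ ds := by
  intro f
  induction f with
  | zero => intro n ds h; omega
  | succ f ih =>
    intro n ds h
    rw [Nat.toDigitsCore]
    by_cases h10 : n / 10 = 0
    · rw [if_pos h10, goChars_lt (by omega), Nat.mod_eq_of_lt (by omega)]
      rfl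
    · rw [if_neg h10, ih (n / 10) _ (by omega)]
      conv_rhs => rw [goChars_ge (by omega : ¬ n < 10)]
      simp

theorem toDigits_eq (n : Nat) : Nat.toDigits 10 n = goChars n := by
  have := toDigitsCore_eq (n + 1) n [] (Nat.lt_succ_self n)
  simpa [Nat.toDigits] using this

theorem digitChar_le_iff (a b : Nat) (ha : a < 10) (hb : b < 10) :
    Nat.digitChar a ≤ Nat.digitChar b ↔ a ≤ b := by
  interval_cases a <;> interval_cases b <;> decide

theorem goChars_last_mem (m : Nat) : Nat.digitChar (m % 10) ∈ goChars m := by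
  by_cases h : m < 10
  · rw [goChars_lt h, Nat.mod_eq_of_lt h]
    simp
  · rw [goChars_ge h]
    simp

theorem goChars_all_le_last (m : Nat) (hp : (goChars m).Pairwise (· ≤ ·)) :
    ∀ a ∈ goChars m, a ≤ Nat.digitChar (m % 10) := by
  by_cases h : m < 10
  · rw [goChars_lt h]
    intro a ha
    rw [List.mem_singleton] at ha
    subst ha
    rw [Nat.mod_eq_of_lt h]
  · rw [goChars_ge h] at hp ⊢
    intro a ha
    rcases List.mem_append.mp ha with h1 | h1
    · exact (List.pairwise_append.mp hp).2.2 a h1 _ (by simp)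
    · rw [List.mem_singleton] at h1
      subst h1
      exact le_refl _

theorem fdiv_int (n : Nat) : PySem.Int.floordiv (n : Int) 10 = ((n / 10 : Nat) : Int) := by
  simp only [PySem.Int.floordiv, Int.fdiv_eq_ediv]
  rw [if_pos (Or.inl (by norm_num : (0:Int) ≤ 10))]
  omega

theorem fmod_int (n : Nat) : PySem.Int.mod (n : Int) 10 = ((n % 10 : Nat) : Int) := by
  simp only [PySem.Int.mod, Int.fmod_eq_emod]
  rw [if_pos (Or.inl (by norm_num : (0:Int) ≤ 10))]
  omega

theorem A_nonneg (n : Nat) :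
    digits_sorted (n : Int) = decide ((goChars n).Pairwise (· ≤ ·)) := by
  induction n using Nat.strong_induction_on with
  | _ n ih =>
    rw [digits_sorted, if_neg (by omega : ¬ (n : Int) < 0)]
    by_cases h : n < 10
    · rw [if_pos (by omega : (n : Int) < 10), goChars_lt h]
      simp
    · rw [if_neg (by omega : ¬ (n : Int) < 10), fdiv_int, fmod_int, fmod_int]
      by_cases hc : n % 10 < (n / 10) % 10
      · rw [if_pos (by omega : ((n % 10 : Nat) : Int) < ((n / 10 % 10 : Nat) : Int))]
        have hnp : ¬ (goChars n).Pairwise (· ≤ ·) := by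
          rw [goChars_ge h, List.pairwise_append]
          rintro ⟨-, -, hall⟩
          have := hall _ (goChars_last_mem (n / 10)) (Nat.digitChar (n % 10)) (by simp)
          rw [digitChar_le_iff _ _ (Nat.mod_lt _ (by omega)) (Nat.mod_lt _ (by omega))] at this
          omega
        simp [hnp]
      · rw [if_neg (by omega : ¬ ((n % 10 : Nat) : Int) < ((n / 10 % 10 : Nat) : Int))]
        rw [ih (n / 10) (Nat.div_lt_self (by omega) (by omega))]
        have hiff : (goChars (n / 10)).Pairwise (· ≤ ·) ↔ (goChars n).Pairwise (· ≤ ·) := by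
          rw [goChars_ge h, List.pairwise_append]
          constructor
          · intro h1
            refine ⟨h1, by simp, ?_⟩
            intro a ha b hb
            rw [List.mem_singleton] at hb
            subst hb
            calc a ≤ Nat.digitChar (n / 10 % 10) := goChars_all_le_last _ h1 a ha
              _ ≤ Nat.digitChar (n % 10) := by
                  rw [digitChar_le_iff _ _ (Nat.mod_lt _ (by omega)) (Nat.mod_lt _ (by omega))]
                  omega
          · exact fun h1 => h1.1
        simp [hiff]

theorem alt_eq (num : Int) :
    digits_sorted_alt num = decide ((goChars num.natAbs).Pairwise (· ≤ ·)) := by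
  unfold digits_sorted_alt
  have h1 : (PySem.Int.toStr |num|).toList = goChars num.natAbs := by
    rw [PySem.Int.toList_toStr]
    simp only [PySem.Int.toChars, if_neg (not_lt.mpr (abs_nonneg num))]
    rw [(by rw [Int.abs_eq_natAbs, Int.toNat_natCast] : |num|.toNat = num.natAbs), toDigits_eq]
  simp only [h1]
  by_cases hp : (goChars num.natAbs).Pairwise (· ≤ ·)
  · rw [PySem.List.sorted_eq_self_of_pairwise _ (fun c => c) hp]
    simp [hp]
  · simp only [hp, decide_false]
    rw [beq_eq_false_iff_ne]
    intro heq
    exact hp (heq ▸ PySem.List.sorted_pairwise (goChars num.natAbs) (fun c => c))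

theorem A_abs (num : Int) : digits_sorted num = digits_sorted ((num.natAbs : Int)) := by
  by_cases h : num < 0
  · conv_lhs => rw [digits_sorted]
    rw [if_pos h, (by omega : num * -1 = (num.natAbs : Int))]
  · rw [(by omega : (num.natAbs : Int) = num)]
-- ===== VERDICT (by name: the statement is the Claim_ definition above) =====
theorem digits_sorted_spec : Claim_equal_digits_sorted := by
  intro num _
  unfold Spec_digits_sorted
  rw [A_abs, A_nonneg, alt_eq]
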